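-- pv_equiv track=rewrite | github.com/stegra05/kicktipp-predictor | experiments/filter_correlated_features.py | _select_columns_by_groups
-- ===== SOURCE A (Python) =====
-- from typing import Iterable, List, Tuple, Dict, Set
--
-- def _select_columns_by_groups(representatives: Dict[str, str]) -> Tuple[List[str], List[str]]:
--     keep: Set[str] = set()
--     drop: Set[str] = set()
--     for col, rep in representatives.items():
--         if col == rep:
--             keep.add(col)
--         else:
--             drop.add(col)
--     # Ensure there is no overlap; if a col is both (shouldn't happen), prefer keep
--     drop -= keep
--     return sorted(keep), sorted(drop)
-- ===== SOURCE B (Python) =====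
-- def _select_columns_by_groups(representatives):
--     ordered = sorted(representatives)
--     keep = [col for col in ordered if representatives[col] == col]
--     # drop = ordered \ keep, computed by a two-pointer walk over the two
--     # sorted lists (keep is a sorted sublist of ordered), no second
--     # predicate pass and no set difference needed.
--     drop = []
--     i = 0
--     for col in ordered:
--         if i < len(keep) and keep[i] == col:
--             i += 1
--         else:
--             drop.append(col)
--     return keep, drop
-- ===== Notes on version B (the rewrite author's own statement) =====
-- stated objective: alternative
-- what changed: Sorts the keys once, selects keep by one filtering pass, and derives drop as the two-pointer sorted-list difference ordered \ keep, instead of A's classification of every key into two sets followed by a set difference and two separate sorts.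
import Mathlib
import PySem

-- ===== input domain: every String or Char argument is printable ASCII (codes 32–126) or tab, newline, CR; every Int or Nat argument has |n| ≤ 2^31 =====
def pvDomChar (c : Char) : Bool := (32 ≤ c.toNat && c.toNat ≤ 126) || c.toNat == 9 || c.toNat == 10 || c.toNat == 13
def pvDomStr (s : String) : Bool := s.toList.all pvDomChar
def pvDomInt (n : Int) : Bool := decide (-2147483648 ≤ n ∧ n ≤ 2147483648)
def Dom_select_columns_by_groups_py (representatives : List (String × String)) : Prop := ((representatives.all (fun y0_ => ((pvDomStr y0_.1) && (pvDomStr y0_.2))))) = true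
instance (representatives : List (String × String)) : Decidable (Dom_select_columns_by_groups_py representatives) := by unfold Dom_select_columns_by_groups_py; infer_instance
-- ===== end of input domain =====

-- B sorts the keys once, selects keep by one filtering pass, and derives drop as the
-- two-pointer sorted-list difference ordered \ keep, instead of A's two accumulated
-- sets, set difference and two separate sorts (alternative algorithm, same cost).
-- ===== PORT A =====
def select_columns_by_groups_py (representatives : List (String × String)) : List String × List String :=
  -- the dict parameter: duplicate keys merge as Python's dict does (last value, first position)
  let d := PySem.Dict.ofList representatives
  -- for col, rep in representatives.items(): keep.add / drop.add
  let st := d.items.foldl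
    (fun (st : PySem.Set String × PySem.Set String) cr =>
      if cr.1 == cr.2 then (PySem.Set.add st.1 cr.1, st.2) else (st.1, PySem.Set.add st.2 cr.1))
    (PySem.Set.empty, PySem.Set.empty)
  -- drop -= keep
  let drop := PySem.Set.diff st.2 st.1
  (PySem.List.sorted st.1 (fun x => x) false, PySem.List.sorted drop (fun x => x) false)

-- ===== PORT B =====
def select_columns_by_groups_py_alt (representatives : List (String × String)) : List String × List String :=
  let d := PySem.Dict.ofList representatives
  -- ordered = sorted(representatives)
  let ordered := PySem.List.sorted d.keys (fun x => x) false
  -- keep = [col for col in ordered if representatives[col] == col]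
  -- (col is always a key of d, so getD's default is never used)
  let keep := ordered.filter (fun c => d.getD c "" == c)
  -- two-pointer walk: drop = ordered \ keep
  let st := ordered.foldl
    (fun (st : Nat × List String) c =>
      if st.1 < keep.length ∧ keep.getD st.1 "" = c then (st.1 + 1, st.2)
      else (st.1, st.2 ++ [c]))
    (0, [])
  (keep, st.2)

-- ===== PRECONDITION & SPEC =====
def Spec_select_columns_by_groups_py (representatives : List (String × String)) (out : List String × List String) : Prop := out = select_columns_by_groups_py_alt representatives
instance (representatives : List (String × String)) (out : List String × List String) : Decidable (Spec_select_columns_by_groups_py representatives out) := by unfold Spec_select_columns_by_groups_py; infer_instance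

-- ===== CLAIM (what is proved, stated in full; the proofs are below) =====
def Claim_equal_select_columns_by_groups_py : Prop := ∀ (representatives : List (String × String)), Dom_select_columns_by_groups_py representatives → Spec_select_columns_by_groups_py representatives (select_columns_by_groups_py representatives)

-- ===== LEMMAS AND PROOFS =====

-- A's loop: both set accumulators at once, over distinct keys not yet in either set
theorem pv_foldA (q : String → Bool) :
    ∀ (l : List String) (s1 s2 : PySem.Set String), l.Nodup →
      (∀ x ∈ l, x ∉ s1) → (∀ x ∈ l, x ∉ s2) →
      List.foldl (fun (x : PySem.Set String × PySem.Set String) y =>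
          (if q y then PySem.Set.add x.1 y else x.1, if q y then x.2 else PySem.Set.add x.2 y))
        (s1, s2) l
      = (s1 ++ l.filter q, s2 ++ l.filter (fun k => !q k)) := by
  intro l
  induction l with
  | nil => intro s1 s2 _ _ _; simp
  | cons k t ih =>
    intro s1 s2 hnd h1 h2
    rcases List.nodup_cons.mp hnd with ⟨hk, hnt⟩
    by_cases hq : q k
    · have hks : k ∉ s1 := h1 k (by simp)
      simp only [List.foldl_cons, if_pos hq, PySem.Set.add_of_not_mem hks]
      rw [ih (s1 ++ [k]) s2 hnt]
      · simp [hq]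
      · intro x hx
        simp only [List.mem_append, List.mem_singleton]
        rintro (h | rfl)
        · exact h1 x (by simp [hx]) h
        · exact hk hx
      · exact fun x hx => h2 x (by simp [hx])
    · have hks : k ∉ s2 := h2 k (by simp)
      simp only [List.foldl_cons, if_neg hq, PySem.Set.add_of_not_mem hks]
      rw [ih s1 (s2 ++ [k]) hnt]
      · simp [hq]
      · exact fun x hx => h1 x (by simp [hx])
      · intro x hx
        simp only [List.mem_append, List.mem_singleton]
        rintro (h | rfl)
        · exact h2 x (by simp [hx]) h
        · exact hk hx

-- sorting a filtered duplicate-free list = filtering the sorted list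
theorem pv_sorted_filter (xs : List String) (h : xs.Nodup) (p : String → Bool) :
    PySem.List.sorted (xs.filter p) (fun x => x)
      = (PySem.List.sorted xs (fun x => x)).filter p := by
  apply PySem.List.sorted_eq_of_perm_of_pairwise_lt
  · exact (PySem.List.sorted_perm xs (fun x => x) false).filter p
  · have h1 := PySem.List.sorted_pairwise xs (fun x => x)
    have h2 : (PySem.List.sorted xs (fun x => x)).Nodup :=
      ((PySem.List.sorted_perm xs (fun x => x) false).nodup_iff).mpr h
    exact (h1.and h2).imp (fun hab => lt_of_le_of_ne hab.1 hab.2) |>.filter p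

-- B's two-pointer walk: with the keep pointer at i and drop i k = the p-elements
-- still ahead, the walk consumes keep and appends exactly the non-p elements
theorem pv_merge (p : String → Bool) (k : List String) :
    ∀ (l : List String) (i : Nat) (dr : List String), l.Nodup →
      List.drop i k = l.filter p →
      List.foldl (fun (st : Nat × List String) c =>
          if st.1 < k.length ∧ k.getD st.1 "" = c then (st.1 + 1, st.2)
          else (st.1, st.2 ++ [c])) (i, dr) l
      = (i + (l.filter p).length, dr ++ l.filter (fun c => !p c)) := by
  intro l
  induction l with
  | nil => intro i dr _ _; simp
  | cons c t ih =>
    intro i dr hnd hdrop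
    rcases List.nodup_cons.mp hnd with ⟨hc, hnt⟩
    by_cases hp : p c
    · have hdrop' : List.drop i k = c :: t.filter p := by simpa [hp] using hdrop
      have hhd : k[i]? = some c := by
        rw [← List.head?_drop, hdrop']; rfl
      have hi : i < k.length := by
        rcases List.getElem?_eq_some_iff.mp hhd with ⟨h, _⟩; exact h
      have hget : k.getD i "" = c := by
        simp [List.getD, hhd]
      have hnext : List.drop (i + 1) k = t.filter p := by
        rw [← List.tail_drop, hdrop']; rfl
      simp only [List.foldl_cons, if_pos (And.intro hi hget)]
      rw [ih (i + 1) dr hnt hnext]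
      simp [hp]
      omega
    · have hdrop' : List.drop i k = t.filter p := by simpa [hp] using hdrop
      have hguard : ¬ (i < k.length ∧ k.getD i "" = c) := by
        rintro ⟨hi, hgd⟩
        have hhd : k[i]? = (t.filter p).head? := by
          rw [← List.head?_drop, hdrop']
        have hsome : k[i]? = some (k.getD i "") := by
          rw [List.getD_eq_getElem k "" hi, List.getElem?_eq_getElem hi]
        rw [hsome, hgd] at hhd
        have : c ∈ t.filter p := List.mem_of_mem_head? (by rw [← hhd]; rfl)
        exact hc (List.mem_of_mem_filter this)
      simp only [List.foldl_cons, if_neg hguard]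
      rw [ih i (dr ++ [c]) hnt hdrop']
      simp [hp]

theorem pv_main : ∀ (representatives : List (String × String)),
    select_columns_by_groups_py representatives
      = select_columns_by_groups_py_alt representatives := by
  intro reps
  unfold select_columns_by_groups_py select_columns_by_groups_py_alt
  set d := PySem.Dict.ofList reps with hd
  have hnd : d.keys.Nodup := PySem.Dict.nodup_keys_ofList reps
  simp only [PySem.Dict.items_eq_map_keys d hnd "", List.foldl_map]
  set ordered := PySem.List.sorted d.keys (fun x => x) false with hord
  have hndo : ordered.Nodup :=
    ((PySem.List.sorted_perm d.keys (fun x => x) false).nodup_iff).mpr hnd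
  -- predicates, read in either direction
  set p : String → Bool := fun c => d.getD c "" == c with hp
  have hpq : (fun y : String => y == d.getD y "") = p := by
    funext y; exact Bool.eq_iff_iff.mpr (by simp only [hp, beq_iff_eq]; exact eq_comm)
  -- A's fold, evaluated
  have hsA : (fun (x : PySem.Set String × PySem.Set String) y =>
        if (y == d.getD y "") = true then (PySem.Set.add x.1 y, x.2) else (x.1, PySem.Set.add x.2 y))
      = fun x y =>
        (if (y == d.getD y "") = true then PySem.Set.add x.1 y else x.1,
         if (y == d.getD y "") = true then x.2 else PySem.Set.add x.2 y) := by
    funext x y; by_cases h : (y == d.getD y "") = true <;> simp [h]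
  rw [hsA, pv_foldA (fun y => y == d.getD y "") d.keys PySem.Set.empty PySem.Set.empty hnd
      (by intro x _ h; simp at h) (by intro x _ h; simp at h)]
  simp only [PySem.Set.empty, List.nil_append]
  -- drop -= keep is a no-op: the two filters are disjoint
  have hdiff : PySem.Set.diff (d.keys.filter (fun y => !(y == d.getD y "")))
        (d.keys.filter (fun y => y == d.getD y ""))
      = d.keys.filter (fun y => !(y == d.getD y "")) := by
    unfold PySem.Set.diff
    rw [List.filter_eq_self]
    intro a ha
    have haq : (a == d.getD a "") = false := by
      have := (List.mem_filter.mp ha).2; simpa using this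
    have hnm : a ∉ d.keys.filter (fun y => y == d.getD y "") := by
      intro hmem
      have := (List.mem_filter.mp hmem).2
      rw [haq] at this; exact Bool.false_ne_true this
    simp [hnm]
  rw [hdiff]
  have hnegpq : (fun y : String => !(y == d.getD y "")) = (fun c => !p c) := by
    funext y; rw [congrFun hpq y]
  rw [hpq, hnegpq,
      pv_sorted_filter d.keys hnd p, pv_sorted_filter d.keys hnd (fun c => !p c), ← hord]
  -- B's two-pointer walk, evaluated
  rw [pv_merge p (ordered.filter p) ordered 0 [] hndo (by simp)]
  simp

-- ===== VERDICT (by name: the statement is the Claim_ definition above) =====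
theorem select_columns_by_groups_py_spec : Claim_equal_select_columns_by_groups_py := by
  intro reps _
  unfold Spec_select_columns_by_groups_py
  exact pv_main reps
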